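-- pv_equiv track=rewrite | github.com/NaluTripician/cosmos-sdk-feature-parity | scripts/generate_snapshot.py | match_features_by_assessment
-- ===== SOURCE A (Python) =====
-- def match_features_by_assessment(
--     text: str, keyword_index: dict[str, list[str]],
-- ) -> list[str]:
--     """
--     Return feature ids whose `assessment.changelog_keywords` appear in `text`
--     (case-insensitive substring match). This is an additional, stronger signal
--     on top of the legacy regex-based detection in scrape_changelogs.py.
--     """
--     lowered = text.lower()
--     hits: list[str] = []
--     for feature_id, keywords in keyword_index.items():
--         for kw in keywords:
--             if kw.lower() in lowered:
--                 hits.append(feature_id)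
--                 break
--     return hits
-- ===== SOURCE B (Python) =====
-- def match_features_by_assessment(
--     text: str, keyword_index: dict[str, list[str]],
-- ) -> list[str]:
--     # Two-phase: first compute the set of lowered keywords that occur in the
--     # text (each distinct keyword's substring scan happens once), then select
--     # features by set membership.
--     lowered = text.lower()
--     matched = {
--         kw.lower()
--         for kws in keyword_index.values()
--         for kw in kws
--         if kw.lower() in lowered
--     }
--     return [
--         fid
--         for fid, kws in keyword_index.items()
--         if any(kw.lower() in matched for kw in kws)
--     ]
-- ===== Notes on version B (the rewrite author's own statement) =====
-- stated objective: alternative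
-- what changed: B replaces A's per-feature scan-with-break by a two-phase pipeline: it first builds the set of lowered keywords found in the text (one substring test per distinct keyword, so duplicate keywords across features are scanned once), then selects feature ids by set membership in a comprehension.
import Mathlib
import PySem

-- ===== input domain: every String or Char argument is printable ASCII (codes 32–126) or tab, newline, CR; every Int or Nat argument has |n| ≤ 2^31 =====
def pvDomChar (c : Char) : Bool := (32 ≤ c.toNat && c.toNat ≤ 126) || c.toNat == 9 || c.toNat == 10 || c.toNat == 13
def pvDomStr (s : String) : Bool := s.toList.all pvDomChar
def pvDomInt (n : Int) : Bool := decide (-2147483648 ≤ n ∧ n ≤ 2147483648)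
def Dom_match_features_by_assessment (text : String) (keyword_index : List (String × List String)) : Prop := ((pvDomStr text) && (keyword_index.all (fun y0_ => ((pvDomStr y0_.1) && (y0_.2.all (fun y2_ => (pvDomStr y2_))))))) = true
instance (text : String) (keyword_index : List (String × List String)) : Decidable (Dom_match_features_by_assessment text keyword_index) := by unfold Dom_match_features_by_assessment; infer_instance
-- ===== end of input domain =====

-- B replaces A's per-feature keyword scan with a two-phase pipeline: build the set of
-- lowered keywords occurring in the text once, then select features by set membership
-- (objective: alternative decomposition, same results).


-- ===== PORT A =====
-- inner 'for kw in keywords: if …: append; break' — returns whether any keyword matched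
def mfbaAnyKw (lowered : String) : List String → Bool
  | [] => false
  | kw :: rest =>
      if PySem.Str.isIn (PySem.Str.lower kw) lowered then true else mfbaAnyKw lowered rest

def match_features_by_assessment (text : String) (keyword_index : List (String × List String)) : List String :=
  let lowered := PySem.Str.lower text
  keyword_index.foldl
    (fun hits p => if mfbaAnyKw lowered p.2 then hits ++ [p.1] else hits) []

-- ===== PORT B =====
def match_features_by_assessment_alt (text : String) (keyword_index : List (String × List String)) : List String :=
  let lowered := PySem.Str.lower text
  let matched : PySem.Set String :=
    PySem.Set.ofList
      (((keyword_index.map Prod.snd).flatMap id).filterMap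
        (fun kw => if PySem.Str.isIn (PySem.Str.lower kw) lowered then some (PySem.Str.lower kw) else none))
  (keyword_index.filter
      (fun p => p.2.any (fun kw => matched.contains (PySem.Str.lower kw)))).map Prod.fst

-- ===== PRECONDITION & SPEC =====
def Spec_match_features_by_assessment (text : String) (keyword_index : List (String × List String)) (out : List String) : Prop := out = match_features_by_assessment_alt text keyword_index
instance (text : String) (keyword_index : List (String × List String)) (out : List String) : Decidable (Spec_match_features_by_assessment text keyword_index out) := by unfold Spec_match_features_by_assessment; infer_instance

-- ===== CLAIM (what is proved, stated in full; the proofs are below) =====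
def Claim_equal_match_features_by_assessment : Prop := ∀ (text : String) (keyword_index : List (String × List String)), Dom_match_features_by_assessment text keyword_index → Spec_match_features_by_assessment text keyword_index (match_features_by_assessment text keyword_index)

-- ===== LEMMAS AND PROOFS =====

-- the inner break-loop is an 'any'
theorem mfbaAnyKw_eq_any (lowered : String) (kws : List String) :
    mfbaAnyKw lowered kws = kws.any (fun kw => PySem.Str.isIn (PySem.Str.lower kw) lowered) := by
  induction kws with
  | nil => rfl
  | cons kw rest ih =>
      by_cases h : PySem.Str.isIn (PySem.Str.lower kw) lowered = true <;>
        simp [mfbaAnyKw, List.any_cons, ih]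

-- List.any_congr in Mathlib needs pointwise equality everywhere; this is the membership version
theorem any_congr_mem {α : Type} (l : List α) (p q : α → Bool)
    (h : ∀ x ∈ l, p x = q x) : l.any p = l.any q := by
  induction l with
  | nil => rfl
  | cons a t ih =>
      simp only [List.any_cons, h a (List.mem_cons_self), ih (fun x hx => h x (List.mem_cons_of_mem _ hx))]

-- membership in B's 'matched' set coincides with the substring test for any keyword of the index
theorem matched_contains (lowered : String) (keyword_index : List (String × List String))
    (kw : String) (hkw : kw ∈ (keyword_index.map Prod.snd).flatMap id) :
    (PySem.Set.ofList
        (((keyword_index.map Prod.snd).flatMap id).filterMap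
          (fun kw => if PySem.Str.isIn (PySem.Str.lower kw) lowered then some (PySem.Str.lower kw) else none))).contains
      (PySem.Str.lower kw)
      = PySem.Str.isIn (PySem.Str.lower kw) lowered := by
  by_cases h : PySem.Str.isIn (PySem.Str.lower kw) lowered = true
  · rw [h]
    rw [PySem.Set.contains_iff, PySem.Set.mem_ofList, List.mem_filterMap]
    exact ⟨kw, hkw, by rw [if_pos h]⟩
  · rw [eq_false_of_ne_true h, Bool.eq_false_iff]
    intro hc
    rw [PySem.Set.contains_iff, PySem.Set.mem_ofList, List.mem_filterMap] at hc
    obtain ⟨kw', _, hif⟩ := hc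
    split at hif
    · rw [Option.some_inj] at hif
      rw [← hif] at h
      exact h (by assumption)
    · exact absurd hif (by simp)

-- ===== VERDICT (by name: the statement is the Claim_ definition above) =====
theorem match_features_by_assessment_spec : Claim_equal_match_features_by_assessment := by
  intro text keyword_index _
  unfold Spec_match_features_by_assessment match_features_by_assessment match_features_by_assessment_alt
  rw [PySem.List.foldl_append_if (fun p => mfbaAnyKw (PySem.Str.lower text) p.2) Prod.fst keyword_index []]
  rw [List.nil_append]
  congr 1
  apply List.filter_congr
  intro p hp
  rw [mfbaAnyKw_eq_any]
  apply any_congr_mem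
  intro kw hkw
  rw [matched_contains (PySem.Str.lower text) keyword_index kw]
  simp only [List.mem_flatMap, List.mem_map, id]
  exact ⟨p.2, ⟨p, hp, rfl⟩, hkw⟩
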